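-- pv_equiv track=rewrite | github.com/bboss99/boss | ui/TextField.py | _getNextSpaceIndex
-- ===== SOURCE A (Python) =====
-- def _getNextSpaceIndex(pStr,pCursorIndex):
--     text = pStr[pCursorIndex:]
--
--     cursorShift = 0
--
--     for i, ch in enumerate(text):
--         if ch == ' ':
--             cursorShift = i+1
--
--             for ch1 in text[cursorShift:]:
--                 if ch1 == ' ':
--                     cursorShift += 1
--
--                 else:
--                     return cursorShift
--
--     return len(pStr) - pCursorIndex
-- ===== SOURCE B (Python) =====
-- def _getNextSpaceIndex(pStr, pCursorIndex):
--     # single forward pass with a seen-space flag instead of A's nested rescanning loops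
--     seen_space = False
--     for j, ch in enumerate(pStr[pCursorIndex:]):
--         if ch != ' ':
--             if seen_space:
--                 return j
--         else:
--             seen_space = True
--     return len(pStr) - pCursorIndex
-- ===== Notes on version B (the rewrite author's own statement) =====
-- stated objective: simpler
-- what changed: Replaces A's nested loops (which, whenever the skip-spaces inner scan reaches the end, restart it at every later space) with one single forward pass carrying a seen-space flag.
import Mathlib
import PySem

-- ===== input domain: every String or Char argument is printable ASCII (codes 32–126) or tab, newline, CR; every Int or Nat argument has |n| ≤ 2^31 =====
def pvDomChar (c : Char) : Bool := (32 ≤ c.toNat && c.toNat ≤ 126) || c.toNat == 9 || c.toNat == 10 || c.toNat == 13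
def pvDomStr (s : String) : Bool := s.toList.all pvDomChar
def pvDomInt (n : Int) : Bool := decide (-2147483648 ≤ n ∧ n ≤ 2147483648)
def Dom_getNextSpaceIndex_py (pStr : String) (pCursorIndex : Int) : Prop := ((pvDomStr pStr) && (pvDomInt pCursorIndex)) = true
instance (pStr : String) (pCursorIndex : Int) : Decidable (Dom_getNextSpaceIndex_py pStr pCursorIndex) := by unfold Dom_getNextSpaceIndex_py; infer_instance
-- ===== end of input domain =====

-- B replaces A's nested rescanning loops by one forward pass with a seen-space flag (simpler).

-- ===== PORT A =====
-- inner loop: for ch1 in text[cursorShift:] — skip spaces (incrementing cursorShift), return at first non-space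
def pvInnerA : List Char → Int → Option Int
  | [], _ => none
  | c :: rest, cs => if c == ' ' then pvInnerA rest (cs + 1) else some cs

-- outer loop: for i, ch in enumerate(text) — at each space, run the inner scan on text[i+1:]
def pvOuterA (text : List Char) : List (Int × Char) → Option Int
  | [] => none
  | (i, ch) :: rest =>
    if ch == ' ' then
      match pvInnerA (PySem.List.slice text (some (i + 1)) none) (i + 1) with
      | some r => some r
      | none => pvOuterA text rest
    else pvOuterA text rest

def getNextSpaceIndex_py (pStr : String) (pCursorIndex : Int) : Int :=
  let text := PySem.List.slice pStr.toList (some pCursorIndex) none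
  match pvOuterA text (PySem.List.enumerate text 0) with
  | some r => r
  | none => (pStr.toList.length : Int) - pCursorIndex

-- ===== PORT B =====
-- single pass: carry seen_space; return j at the first non-space after a space
def pvScanB : List Char → Bool → Int → Option Int
  | [], _, _ => none
  | c :: rest, seen, j =>
    if c != ' ' then
      (if seen then some j else pvScanB rest seen (j + 1))
    else pvScanB rest true (j + 1)

def getNextSpaceIndex_py_alt (pStr : String) (pCursorIndex : Int) : Int :=
  let text := PySem.List.slice pStr.toList (some pCursorIndex) none
  match pvScanB text false 0 with
  | some r => r
  | none => (pStr.toList.length : Int) - pCursorIndex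

-- ===== PRECONDITION & SPEC =====
def Spec_getNextSpaceIndex_py (pStr : String) (pCursorIndex : Int) (out : Int) : Prop := out = getNextSpaceIndex_py_alt pStr pCursorIndex
instance (pStr : String) (pCursorIndex : Int) (out : Int) : Decidable (Spec_getNextSpaceIndex_py pStr pCursorIndex out) := by unfold Spec_getNextSpaceIndex_py; infer_instance

-- ===== CLAIM (what is proved, stated in full; the proofs are below) =====
def Claim_equal_getNextSpaceIndex_py : Prop := ∀ (pStr : String) (pCursorIndex : Int), Dom_getNextSpaceIndex_py pStr pCursorIndex → Spec_getNextSpaceIndex_py pStr pCursorIndex (getNextSpaceIndex_py pStr pCursorIndex)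

-- ===== LEMMAS AND PROOFS =====

-- the inner scan of A is exactly B's scan once a space has been seen
theorem pvInnerA_eq_scanB (l : List Char) : ∀ j : Int, pvInnerA l j = pvScanB l true j := by
  induction l with
  | nil => intro j; rfl
  | cons c rest ih =>
    intro j
    by_cases h : c = ' ' <;> simp [pvInnerA, pvScanB, h, ih]

-- the inner scan returns none exactly when everything left is spaces
theorem pvInnerA_none_iff (l : List Char) : ∀ j : Int, pvInnerA l j = none ↔ ∀ c ∈ l, c = ' ' := by
  induction l with
  | nil => intro j; simp [pvInnerA]
  | cons c rest ih =>
    intro j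
    by_cases h : c = ' ' <;> simp [pvInnerA, h, ih]

-- B's scan (either flag) returns none on an all-space list
theorem pvScanB_all_space (l : List Char) (h : ∀ c ∈ l, c = ' ') :
    ∀ (seen : Bool) (j : Int), pvScanB l seen j = none := by
  induction l with
  | nil => intro seen j; rfl
  | cons c rest ih =>
    intro seen j
    have hc : c = ' ' := h c (by simp)
    simp [pvScanB, hc]
    exact ih (fun d hd => h d (by simp [hd])) true (j + 1)

-- main invariant: A's outer loop on the enumerated suffix equals B's scan from k with flag false
theorem pvOuter_eq_scan (text : List Char) :
    ∀ k : Nat, pvOuterA text (PySem.List.enumerate (text.drop k) (k : Int)) = pvScanB (text.drop k) false (k : Int) := by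
  intro k
  induction hn : text.length - k generalizing k with
  | zero =>
    have : text.drop k = [] := List.drop_eq_nil_of_le (by omega)
    simp [this, pvOuterA, pvScanB]
  | succ n ih =>
    have hk : k < text.length := by omega
    have hdrop : text.drop k = text[k] :: text.drop (k + 1) := List.drop_eq_getElem_cons hk
    have hcast : (k : Int) + 1 = ((k + 1 : Nat) : Int) := by push_cast; ring
    have hslice : PySem.List.slice text (some ((k : Int) + 1)) none = text.drop (k + 1) := by
      rw [hcast, PySem.List.slice_from_natCast]
    have ih' := ih (k + 1) (by omega)
    by_cases hc : text[k] = ' '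
    · rw [hdrop]
      rw [PySem.List.enumerate_cons]
      simp only [pvOuterA, pvScanB, hc, hslice]
      rw [pvInnerA_eq_scanB]
      cases he : pvScanB (text.drop (k + 1)) true ((k : Int) + 1) with
      | some r => simp
      | none =>
        simp only
        have hall : ∀ c ∈ text.drop (k + 1), c = ' ' := by
          rw [← pvInnerA_none_iff _ ((k : Int) + 1), pvInnerA_eq_scanB]; exact he
        rw [hcast, ih', pvScanB_all_space _ hall]
        simp
    · rw [hdrop, PySem.List.enumerate_cons]
      have hb : ¬ ((text[k] == ' ') = true) := by simpa using hc
      have hb' : (text[k] != ' ') = true := by simpa using hc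
      simp only [pvOuterA, pvScanB]
      rw [if_neg hb, if_pos hb', if_neg (by simp : ¬ (false = true)), hcast, ih']

-- ===== VERDICT (by name: the statement is the Claim_ definition above) =====
theorem getNextSpaceIndex_py_spec : Claim_equal_getNextSpaceIndex_py := by
  intro pStr pCursorIndex _
  unfold Spec_getNextSpaceIndex_py getNextSpaceIndex_py getNextSpaceIndex_py_alt
  have h := pvOuter_eq_scan (PySem.List.slice pStr.toList (some pCursorIndex) none) 0
  simp only [List.drop_zero, Int.natCast_zero] at h
  simp only [h]
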